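-- pv_equiv track=rewrite | github.com/NicklasPhoenix/solutions.mescius | pricing_validator.py | categorize_license_type
-- ===== SOURCE A (Python) =====
-- def categorize_license_type(product_name, internal_name=''):
--     """Categorize product into license type based on name and internal name"""
--     name_lower = product_name.lower()
--     internal_lower = internal_name.lower() if internal_name else ''
--
--     # Check for perpetual licenses
--     if 'perpetual' in name_lower:
--         return 'perpetual'
--
--     # Check for renewals/maintenance
--     if any(keyword in name_lower for keyword in ['renewal', 'maintenance']):
--         return 'renewal'
--     if any(keyword in internal_lower for keyword in ['-r', 'renewal']):
--         return 'renewal'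
--
--     # Check for upgrades
--     if 'upgrade' in name_lower:
--         return 'upgrade'
--     if any(keyword in internal_lower for keyword in ['-u', 'upgrade']):
--         return 'upgrade'
--
--     # Check for subscription
--     if any(keyword in name_lower for keyword in ['subscription', 'annual', 'monthly']):
--         return 'subscription'
--
--     # Default to new license
--     return 'new-license'
-- ===== SOURCE B (Python) =====
-- # Exhaustive keyword scoring: every keyword carries a priority rank; take the
-- # minimum matched rank (6 if none) and look the label up by rank.
-- _KEYWORDS = [
--     ('perpetual', True, 0),
--     ('renewal', True, 1), ('maintenance', True, 1),
--     ('-r', False, 2), ('renewal', False, 2),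
--     ('upgrade', True, 3),
--     ('-u', False, 4), ('upgrade', False, 4),
--     ('subscription', True, 5), ('annual', True, 5), ('monthly', True, 5),
-- ]
-- _LABELS = ['perpetual', 'renewal', 'renewal', 'upgrade', 'upgrade',
--            'subscription', 'new-license']
--
-- def categorize_license_type(product_name, internal_name=''):
--     name = product_name.lower()
--     internal = internal_name.lower()
--     best = 6
--     for kw, in_name, rank in _KEYWORDS:
--         if kw in (name if in_name else internal):
--             best = min(best, rank)
--     return _LABELS[best]
-- ===== Notes on version B (the rewrite author's own statement) =====
-- stated objective: alternative
-- what changed: Replaced the short-circuit if-cascade with exhaustive scoring: every keyword carries a priority rank, one accumulator loop takes the minimum matched rank over all keywords, and the label is looked up by rank.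
import Mathlib
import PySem

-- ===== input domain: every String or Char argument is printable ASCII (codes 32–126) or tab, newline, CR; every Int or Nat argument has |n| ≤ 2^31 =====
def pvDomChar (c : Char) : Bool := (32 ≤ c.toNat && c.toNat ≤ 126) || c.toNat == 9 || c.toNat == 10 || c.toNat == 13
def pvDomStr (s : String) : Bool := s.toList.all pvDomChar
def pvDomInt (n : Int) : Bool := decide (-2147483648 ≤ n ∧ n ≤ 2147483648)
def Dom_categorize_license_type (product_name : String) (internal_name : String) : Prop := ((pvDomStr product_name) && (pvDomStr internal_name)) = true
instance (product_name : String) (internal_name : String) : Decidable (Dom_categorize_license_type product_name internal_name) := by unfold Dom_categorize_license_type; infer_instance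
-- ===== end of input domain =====

-- B replaces A's short-circuit if-cascade with exhaustive min-rank keyword scoring plus a label lookup (objective: alternative).

-- ===== PORT A =====
def categorize_license_type (product_name : String) (internal_name : String) : String :=
  let name_lower := PySem.Str.lower product_name
  let internal_lower := if internal_name ≠ "" then PySem.Str.lower internal_name else ""
  if PySem.Str.isIn "perpetual" name_lower then "perpetual"
  else if ["renewal", "maintenance"].any (fun k => PySem.Str.isIn k name_lower) then "renewal"
  else if ["-r", "renewal"].any (fun k => PySem.Str.isIn k internal_lower) then "renewal"
  else if PySem.Str.isIn "upgrade" name_lower then "upgrade"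
  else if ["-u", "upgrade"].any (fun k => PySem.Str.isIn k internal_lower) then "upgrade"
  else if ["subscription", "annual", "monthly"].any (fun k => PySem.Str.isIn k name_lower) then "subscription"
  else "new-license"

-- ===== PORT B =====
-- keyword table: (keyword, true = search name / false = search internal, priority rank)
def pvKeywords : List (String × Bool × Nat) :=
  [ ("perpetual", true, 0)
  , ("renewal", true, 1), ("maintenance", true, 1)
  , ("-r", false, 2), ("renewal", false, 2)
  , ("upgrade", true, 3)
  , ("-u", false, 4), ("upgrade", false, 4)
  , ("subscription", true, 5), ("annual", true, 5), ("monthly", true, 5) ]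

def pvLabels : List String :=
  ["perpetual", "renewal", "renewal", "upgrade", "upgrade", "subscription", "new-license"]

def categorize_license_type_alt (product_name : String) (internal_name : String) : String :=
  let name := PySem.Str.lower product_name
  let internal := PySem.Str.lower internal_name
  let best := pvKeywords.foldl
    (fun best t => if PySem.Str.isIn t.1 (if t.2.1 then name else internal) then Nat.min best t.2.2 else best) 6
  pvLabels.getD best "new-license"

-- ===== PRECONDITION & SPEC =====
def Spec_categorize_license_type (product_name : String) (internal_name : String) (out : String) : Prop := out = categorize_license_type_alt product_name internal_name
instance (product_name : String) (internal_name : String) (out : String) : Decidable (Spec_categorize_license_type product_name internal_name out) := by unfold Spec_categorize_license_type; infer_instance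

-- ===== CLAIM (what is proved, stated in full; the proofs are below) =====
def Claim_equal_categorize_license_type : Prop := ∀ (product_name : String) (internal_name : String), Dom_categorize_license_type product_name internal_name → Spec_categorize_license_type product_name internal_name (categorize_license_type product_name internal_name)

-- ===== LEMMAS AND PROOFS =====
theorem lower_of_empty_guard (s : String) :
    (if s ≠ "" then PySem.Str.lower s else "") = PySem.Str.lower s := by
  by_cases h : s = ""
  · subst h; rfl
  · simp [h]

-- the cascade and the min-rank scoring agree for every valuation of the 11 membership tests
theorem pvCascade_eq_minRank (p r1 m ir ir2 u iu iu2 s1 s2 s3 : Bool) :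
    (if p then "perpetual"
     else if (r1 || (m || false)) then "renewal"
     else if (ir || (ir2 || false)) then "renewal"
     else if u then "upgrade"
     else if (iu || (iu2 || false)) then "upgrade"
     else if (s1 || (s2 || (s3 || false))) then "subscription"
     else "new-license")
    = pvLabels.getD
        (let b0 := if p then Nat.min 6 0 else 6
         let b1 := if r1 then Nat.min b0 1 else b0
         let b2 := if m then Nat.min b1 1 else b1
         let b3 := if ir then Nat.min b2 2 else b2
         let b4 := if ir2 then Nat.min b3 2 else b3
         let b5 := if u then Nat.min b4 3 else b4
         let b6 := if iu then Nat.min b5 4 else b5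
         let b7 := if iu2 then Nat.min b6 4 else b6
         let b8 := if s1 then Nat.min b7 5 else b7
         let b9 := if s2 then Nat.min b8 5 else b8
         if s3 then Nat.min b9 5 else b9) "new-license" := by
  cases p <;> cases r1 <;> cases m <;> cases ir <;> cases ir2 <;> cases u <;>
    cases iu <;> cases iu2 <;> cases s1 <;> cases s2 <;> cases s3 <;> rfl

-- ===== VERDICT (by name: the statement is the Claim_ definition above) =====
theorem categorize_license_type_spec : Claim_equal_categorize_license_type := by
  intro pn inm _
  unfold Spec_categorize_license_type categorize_license_type categorize_license_type_alt
  simp only [lower_of_empty_guard, pvKeywords, List.foldl_cons, List.foldl_nil,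
    List.any_cons, List.any_nil]
  exact pvCascade_eq_minRank _ _ _ _ _ _ _ _ _ _ _
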